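-- pv_equiv track=rewrite | github.com/stelaninja/AdventOfCode2020 | day6.py | get_group_answers
-- ===== SOURCE A (Python) =====
-- def get_group_answers(group):
--     answer_list = []
--     answer_dict = {}
--     answer2 = 0
--
--     for person in group:
--         for ans in person:
--             if ans not in answer_dict:
--                 answer_dict[ans] = 1
--             else:
--                 answer_dict[ans] += 1
--
--             answer_list.append(ans)
--
--     for key in answer_dict:
--         if answer_dict[key] == len(group):
--             answer2 += 1
--
--     answer1 = set(answer_list)
--
--     return len(answer1), answer2
-- ===== SOURCE B (Python) =====
-- def get_group_answers(group):
--     # sort all answer characters and count runs instead of building a dict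
--     chars = sorted("".join(group))
--     n = len(group)
--     distinct = 0
--     shared = 0
--     i = 0
--     m = len(chars)
--     while i < m:
--         j = i + 1
--         while j < m and chars[j] == chars[i]:
--             j += 1
--         distinct += 1
--         if j - i == n:
--             shared += 1
--         i = j
--     return distinct, shared
-- ===== Notes on version B (the rewrite author's own statement) =====
-- stated objective: idiomatic
-- what changed: Replaces the dict/list/set bookkeeping with sorting the flattened answers once and counting equal-character runs: run count gives the distinct total and runs of length len(group) give the shared total.
import Mathlib
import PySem

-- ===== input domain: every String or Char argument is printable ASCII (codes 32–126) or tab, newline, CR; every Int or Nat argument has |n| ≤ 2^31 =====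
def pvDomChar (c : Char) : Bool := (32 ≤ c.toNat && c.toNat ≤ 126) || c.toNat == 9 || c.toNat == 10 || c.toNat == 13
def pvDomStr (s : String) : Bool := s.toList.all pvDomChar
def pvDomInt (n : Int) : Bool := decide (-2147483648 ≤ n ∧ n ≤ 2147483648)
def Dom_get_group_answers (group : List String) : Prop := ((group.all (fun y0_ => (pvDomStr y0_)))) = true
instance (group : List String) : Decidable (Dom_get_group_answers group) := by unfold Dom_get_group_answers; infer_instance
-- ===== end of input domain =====

-- B replaces A's dict/list/set bookkeeping by sorting the flattened answers and counting equal-character runs (idiomatic alternative, not claimed faster).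


-- ===== PORT A =====
def get_group_answers (group : List String) : Int × Int :=
  let st := group.foldl
    (fun (st : PySem.Dict Char Int × List Char) person =>
      person.toList.foldl
        (fun (st : PySem.Dict Char Int × List Char) ans =>
          ((if st.1.contains ans = false then st.1.insert ans 1 else st.1.modify ans 0 (· + 1)),
           st.2 ++ [ans])) st)
    ((PySem.Dict.empty : PySem.Dict Char Int), ([] : List Char))
  let answer_dict := st.1
  let answer_list := st.2
  let answer2 : Int := answer_dict.keys.foldl
    (fun (acc : Int) key => if answer_dict.getD key 0 = (group.length : Int) then acc + 1 else acc) 0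
  let answer1 : PySem.Set Char := PySem.Set.ofList answer_list
  (PySem.Set.len answer1, answer2)

-- ===== PORT B =====
-- the two while loops of Source B: the inner while advances j over the run of chars[i] (takeWhile/dropWhile), the outer while continues at j
def pvScanRuns (n : Int) : List Char → Int → Int → Int × Int
  | [], distinct, shared => (distinct, shared)
  | c :: rest, distinct, shared =>
    pvScanRuns n (rest.dropWhile (fun x => x == c)) (distinct + 1)
      (if ((rest.takeWhile (fun x => x == c)).length + 1 : Int) = n then shared + 1 else shared)
termination_by l => l.length
decreasing_by simpa using Nat.lt_succ_of_le (List.length_dropWhile_le _ rest)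

def get_group_answers_alt (group : List String) : Int × Int :=
  let chars := PySem.List.sorted ((PySem.Str.join "" group).toList) (fun c => c)
  pvScanRuns (group.length : Int) chars 0 0

-- ===== PRECONDITION & SPEC =====
def Spec_get_group_answers (group : List String) (out : Int × Int) : Prop := out = get_group_answers_alt group
instance (group : List String) (out : Int × Int) : Decidable (Spec_get_group_answers group out) := by unfold Spec_get_group_answers; infer_instance

-- ===== CLAIM (what is proved, stated in full; the proofs are below) =====
def Claim_equal_get_group_answers : Prop := ∀ (group : List String), Dom_get_group_answers group → Spec_get_group_answers group (get_group_answers group)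

-- ===== LEMMAS AND PROOFS =====

-- all answer characters of the group, in order
def pvFlat (group : List String) : List Char := (group.map String.toList).flatten

lemma pv_join_flat (group : List String) :
    (PySem.Str.join "" group).toList = pvFlat group := by
  rw [PySem.Str.toList_join]
  unfold pvFlat
  generalize group.map String.toList = ps
  induction ps with
  | nil => simp [PySem.Chars.join_nil]
  | cons p rest ih =>
    cases rest with
    | nil => simp [PySem.Chars.join_singleton]
    | cons q r => simp [PySem.Chars.join_cons_cons] at ih ⊢; simpa using ih

-- A's nested loop: the pair state splits into a dict fold over the flattened chars and the flattened list itself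
lemma pv_pairfold (group : List String) (d : PySem.Dict Char Int) (lst : List Char) :
    group.foldl
      (fun (st : PySem.Dict Char Int × List Char) person =>
        person.toList.foldl
          (fun (st : PySem.Dict Char Int × List Char) ans =>
            ((if st.1.contains ans = false then st.1.insert ans 1 else st.1.modify ans 0 (· + 1)),
             st.2 ++ [ans])) st) (d, lst)
    = ((pvFlat group).foldl (fun d x => d.modify x 0 (· + 1)) d, lst ++ pvFlat group) := by
  have hfun : (fun (st : PySem.Dict Char Int × List Char) ans =>
        ((if st.1.contains ans = false then st.1.insert ans 1 else st.1.modify ans 0 (· + 1)),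
         st.2 ++ [ans]))
      = (fun (st : PySem.Dict Char Int × List Char) ans =>
         (st.1.modify ans 0 (· + 1), st.2 ++ [ans])) := by
    funext st ans
    by_cases h : st.1.contains ans = false
    · simp [h, PySem.Dict.insert, PySem.Dict.modify,
        PySem.Dict.get?_eq_none_iff_contains, PySem.Dict.getD_of_get?_eq_none]
    · simp [h]
  rw [hfun]
  have inner : ∀ (cs : List Char) (d : PySem.Dict Char Int) (lst : List Char),
      cs.foldl (fun (st : PySem.Dict Char Int × List Char) ans =>
            (st.1.modify ans 0 (· + 1), st.2 ++ [ans])) (d, lst)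
        = (cs.foldl (fun d x => d.modify x 0 (· + 1)) d, lst ++ cs) := by
    intro cs
    induction cs with
    | nil => intro d lst; simp
    | cons c cs ih => intro d lst; simp [List.foldl_cons, ih]
  unfold pvFlat
  induction group generalizing d lst with
  | nil => simp
  | cons p rest ih =>
    rw [List.foldl_cons, inner, ih]
    simp [List.foldl_append]

-- on a sorted list, the element starting a run does not reappear after the run
lemma pv_not_mem_drop (c : Char) (rest : List Char) (hle : ∀ x ∈ rest, c ≤ x)
    (hp : rest.Pairwise (· ≤ ·)) : c ∉ rest.dropWhile (fun x => x == c) := by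
  intro hmem
  set rest' := rest.dropWhile (fun x => x == c) with hr
  cases h : rest' with
  | nil => simp [h] at hmem
  | cons dd tl =>
    have hdne : (dd == c) = false := by
      have := List.head?_dropWhile_not (fun x => x == c) rest
      rw [← hr, h] at this; simpa using this
    have hd_ne : dd ≠ c := by simpa using hdne
    have hsub : rest'.Sublist rest := List.dropWhile_sublist _
    have hp' : rest'.Pairwise (· ≤ ·) := hp.sublist hsub
    rw [h] at hmem hp' hsub
    rcases List.mem_cons.mp hmem with rfl | htl
    · exact hd_ne rfl
    · have h1 : dd ≤ c := (List.pairwise_cons.mp hp').1 c htl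
      have h2 : c ≤ dd := hle dd (hsub.mem (List.mem_cons_self))
      exact hd_ne (le_antisymm h1 h2)

-- B's scan over a sorted list returns (#distinct, #chars occurring exactly n times), phrased via dedup
theorem pv_scan_sorted (n : Int) (l : List Char) (hs : l.Pairwise (· ≤ ·)) (d s : Int) :
    pvScanRuns n l d s
      = (d + ((PySem.List.dedup l).length : Int),
         s + (((PySem.List.dedup l).countP (fun c => decide ((l.count c : Int) = n))) : Int)) := by
  match l with
  | [] => simp [pvScanRuns, PySem.List.dedup, PySem.Set.ofList]
  | c :: rest =>
    have hle : ∀ x ∈ rest, c ≤ x := (List.pairwise_cons.mp hs).1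
    have hp : rest.Pairwise (· ≤ ·) := (List.pairwise_cons.mp hs).2
    set run := rest.takeWhile (fun x => x == c) with hrun_def
    set rest' := rest.dropWhile (fun x => x == c) with hrest'_def
    have hsplit : run ++ rest' = rest := List.takeWhile_append_dropWhile
    have hrun : ∀ x ∈ run, x = c := fun x hx => by
      simpa using List.mem_takeWhile_imp hx
    have hnc : c ∉ rest' := pv_not_mem_drop c rest hle hp
    have hp' : rest'.Pairwise (· ≤ ·) := hp.sublist (List.dropWhile_sublist _)
    have hcount_c : (c :: rest).count c = run.length + 1 := by
      rw [List.count_cons_self, ← hsplit, List.count_append]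
      have h1 : run.count c = run.length := List.count_eq_length.mpr (fun b hb => (hrun b hb).symm)
      have h2 : rest'.count c = 0 := List.count_eq_zero.mpr hnc
      omega
    have hcount_ne : ∀ x, x ≠ c → (c :: rest).count x = rest'.count x := by
      intro x hx
      have h0 : (c :: rest).count x = rest.count x := by
        simp [Ne.symm hx]
      have h1 : run.count x = 0 := List.count_eq_zero.mpr (fun hmem => hx (hrun x hmem))
      rw [h0, ← hsplit, List.count_append]
      omega
    have hded : PySem.List.dedup (c :: rest) = c :: (PySem.Set.ofList rest).discard c := by
      rw [PySem.List.dedup_eq_ofList, PySem.Set.ofList_cons]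
    have hperm : ((PySem.Set.ofList rest).discard c).Perm (PySem.List.dedup rest') := by
      rw [List.perm_ext_iff_of_nodup
        (PySem.Set.nodup_discard _ _ (PySem.Set.nodup_ofList rest)) (PySem.List.nodup_dedup rest')]
      intro x
      rw [PySem.Set.mem_discard, PySem.Set.mem_ofList, PySem.List.mem_dedup]
      constructor
      · rintro ⟨hxr, hxc⟩
        rw [← hsplit] at hxr
        rcases List.mem_append.mp hxr with h | h
        · exact absurd (hrun x h) hxc
        · exact h
      · intro hx
        refine ⟨?_, fun hxc => hnc (hxc ▸ hx)⟩
        rw [← hsplit]; exact List.mem_append.mpr (Or.inr hx)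
    have hlen : (PySem.List.dedup (c :: rest)).length = (PySem.List.dedup rest').length + 1 := by
      rw [hded, List.length_cons, hperm.length_eq]
    have hpc : (decide (((c :: rest).count c : Int) = n))
        = (decide ((run.length : Int) + 1 = n)) := by
      apply decide_eq_decide.mpr
      rw [hcount_c]; push_cast
      constructor <;> intro <;> omega
    have hrest : ((PySem.Set.ofList rest).discard c).countP
          (fun x => decide (((c :: rest).count x : Int) = n))
        = (PySem.List.dedup rest').countP (fun x => decide ((rest'.count x : Int) = n)) := by
      rw [hperm.countP_eq]
      apply List.countP_congr
      intro x hx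
      have hxr : x ∈ rest' := (PySem.List.mem_dedup _ _).mp hx
      have hxc : x ≠ c := fun h => hnc (h ▸ hxr)
      rw [hcount_ne x hxc]
    have hcp : (PySem.List.dedup (c :: rest)).countP
          (fun x => decide (((c :: rest).count x : Int) = n))
        = (PySem.List.dedup rest').countP (fun x => decide ((rest'.count x : Int) = n))
          + (if ((run.length : Int) + 1 = n) then 1 else 0) := by
      rw [hded, List.countP_cons, hrest, hpc]
      by_cases h : ((run.length : Int) + 1 = n) <;> simp [h]
    rw [pvScanRuns]
    rw [pv_scan_sorted n rest' hp' (d + 1)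
      (if ((rest.takeWhile (fun x => x == c)).length + 1 : Int) = n then s + 1 else s)]
    rw [Prod.mk.injEq]
    constructor
    · rw [hlen]; push_cast; ring
    · rw [hcp, ← hrun_def]
      by_cases h : ((run.length : Int) + 1 = n)
      · rw [if_pos h, if_pos h]; push_cast; ring
      · rw [if_neg h, if_neg h]; push_cast; ring
termination_by l.length
decreasing_by simpa using Nat.lt_succ_of_le (List.length_dropWhile_le _ rest)

-- ===== VERDICT (by name: the statement is the Claim_ definition above) =====
theorem get_group_answers_spec : Claim_equal_get_group_answers := by
  intro group _
  unfold Spec_get_group_answers get_group_answers get_group_answers_alt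
  simp only [pv_pairfold, pv_join_flat]
  set F := pvFlat group with hF
  set n : Int := (group.length : Int) with hn
  -- A's dict is Counter(F)
  rw [← PySem.Dict.counter_eq_foldl]
  -- A's second loop counts distinct chars of F occurring exactly n times
  have hkeys : (PySem.Dict.counter F).keys = PySem.List.dedup F := by
    rw [PySem.Dict.keys_counter, PySem.List.dedup_eq_ofList]
  have h2 : (PySem.Dict.counter F).keys.foldl
      (fun (acc : Int) key => if (PySem.Dict.counter F).getD key 0 = n then acc + 1 else acc) 0
      = ((PySem.List.dedup F).countP (fun c => decide ((F.count c : Int) = n)) : Int) := by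
    have := PySem.List.foldl_count_if
      (fun key => decide ((PySem.Dict.counter F).getD key 0 = n)) (PySem.Dict.counter F).keys 0
    simp only [decide_eq_true_eq] at this
    rw [this, hkeys, zero_add]
    congr 1
    apply List.countP_congr
    intro x _
    simp [PySem.Dict.getD_counter]
  -- A's set of all answers
  have h1 : PySem.Set.len (PySem.Set.ofList F) = ((PySem.List.dedup F).length : Int) := by
    rw [PySem.List.dedup_eq_ofList, PySem.Set.len]
  -- B's side
  set S := PySem.List.sorted F (fun c => c) with hS
  have hsp : S.Pairwise (· ≤ ·) := PySem.List.sorted_pairwise F (fun c => c)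
  have hperm : S.Perm F := PySem.List.sorted_perm F (fun c => c) false
  have hdperm : (PySem.List.dedup S).Perm (PySem.List.dedup F) := by
    rw [List.perm_ext_iff_of_nodup (PySem.List.nodup_dedup S) (PySem.List.nodup_dedup F)]
    intro x
    rw [PySem.List.mem_dedup, PySem.List.mem_dedup, hperm.mem_iff]
  rw [pv_scan_sorted n S hsp 0 0]
  have hcnt : (PySem.List.dedup S).countP (fun c => decide ((S.count c : Int) = n))
      = (PySem.List.dedup F).countP (fun c => decide ((F.count c : Int) = n)) := by
    rw [List.countP_congr (fun x _ => by rw [hperm.count_eq x])]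
    exact hdperm.countP_eq _
  simp only [List.nil_append]
  rw [hcnt, hdperm.length_eq, h1, h2]
  simp
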